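-- pv_equiv track=rewrite | github.com/tomkotik/aimanager | src/core/postprocess.py | _enforce_question_limit
-- ===== SOURCE A (Python) =====
-- def _enforce_question_limit(text: str, max_questions: int) -> str:
--     """If text has too many question marks, truncate after the Nth one."""
--     count = 0
--     for i, ch in enumerate(text):
--         if ch == "?":
--             count += 1
--             if count >= max_questions:
--                 # Keep up to and including this question mark.
--                 return text[: i + 1].strip()
--     return text
-- ===== SOURCE B (Python) =====
-- def _enforce_question_limit(text: str, max_questions: int) -> str:
--     """If text has too many question marks, truncate after the Nth one."""
--     n = max(1, max_questions)  # A truncates at the first mark for any limit <= 1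
--     parts = text.split("?", n)
--     if len(parts) <= n:
--         # fewer than n question marks: nothing to do
--         return text
--     # parts[-1] is everything after the nth '?'; cut it off (keeping the '?')
--     return text[: len(text) - len(parts[-1])].strip()
-- ===== Notes on version B (the rewrite author's own statement) =====
-- stated objective: faster
-- what changed: B replaces A's per-character counting loop by a single library split with maxsplit (text.split('?', max(1, max_questions))) followed by pure length arithmetic: at most n parts means fewer than n marks (return text), otherwise the truncation point is len(text) minus the length of the last part.
import Mathlib
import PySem

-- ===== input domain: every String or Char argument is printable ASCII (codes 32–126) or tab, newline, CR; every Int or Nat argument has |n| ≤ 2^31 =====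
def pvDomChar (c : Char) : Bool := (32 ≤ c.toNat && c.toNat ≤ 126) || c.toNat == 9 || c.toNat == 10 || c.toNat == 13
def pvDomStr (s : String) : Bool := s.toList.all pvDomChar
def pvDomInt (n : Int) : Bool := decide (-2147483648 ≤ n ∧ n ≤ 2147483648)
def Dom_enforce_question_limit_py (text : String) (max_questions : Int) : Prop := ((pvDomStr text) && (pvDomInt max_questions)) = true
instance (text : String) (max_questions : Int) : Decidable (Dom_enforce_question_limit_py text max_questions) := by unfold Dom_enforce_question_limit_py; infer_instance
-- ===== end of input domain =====

-- B replaces A's per-character counting scan by one split('?', n) with maxsplit plus length arithmetic (measured faster in a timing run).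

-- ===== PORT A =====
-- for i, ch in enumerate(text): if ch == '?': count += 1; if count >= max_questions: return text[:i+1].strip()
def pvA_loop (text : String) (mq : Int) : List (Int × Char) → Int → String
  | [], _ => text
  | (i, ch) :: rest, count =>
    if ch = '?' then
      if count + 1 ≥ mq then PySem.Str.strip (PySem.Str.slice text none (some (i + 1)))
      else pvA_loop text mq rest (count + 1)
    else pvA_loop text mq rest count

def enforce_question_limit_py (text : String) (max_questions : Int) : String :=
  pvA_loop text max_questions (PySem.List.enumerate text.toList 0) 0

-- ===== PORT B =====
-- n = max(1, mq); parts = text.split('?', n); if len(parts) <= n: return text; return text[: len(text) - len(parts[-1])].strip()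
def enforce_question_limit_py_alt (text : String) (max_questions : Int) : String :=
  let n : Int := max 1 max_questions
  -- text.split("?", n): the separator "?" is non-empty, so splitMax? is always `some`
  let parts : List String := (PySem.Str.splitMax? text "?" n).getD []
  if (parts.length : Int) ≤ n then text
  else
    -- parts[-1]: parts is never empty (split always yields at least one part)
    let last : String := (PySem.List.pyGet? parts (-1)).getD ""
    PySem.Str.strip (PySem.Str.slice text none (some (PySem.Str.len text - PySem.Str.len last)))

-- ===== PRECONDITION & SPEC =====
def Spec_enforce_question_limit_py (text : String) (max_questions : Int) (out : String) : Prop := out = enforce_question_limit_py_alt text max_questions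
instance (text : String) (max_questions : Int) (out : String) : Decidable (Spec_enforce_question_limit_py text max_questions out) := by unfold Spec_enforce_question_limit_py; infer_instance

-- ===== CLAIM (what is proved, stated in full; the proofs are below) =====
def Claim_equal_enforce_question_limit_py : Prop := ∀ (text : String) (max_questions : Int), Dom_enforce_question_limit_py text max_questions → Spec_enforce_question_limit_py text max_questions (enforce_question_limit_py text max_questions)

-- ===== LEMMAS AND PROOFS =====

-- Reference form of A's loop: remaining count k instead of an increasing counter.
def refA (text : String) : List Char → Int → Int → String
  | [], _, _ => text
  | c :: rest, i, k =>
    if c = '?' then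
      if k ≤ 1 then PySem.Str.strip (PySem.Str.slice text none (some (i + 1)))
      else refA text rest (i + 1) (k - 1)
    else refA text rest (i + 1) k

lemma pvA_loop_eq_refA (text : String) (mq : Int) (l : List Char) :
    ∀ (s count : Int), pvA_loop text mq (PySem.List.enumerate l s) count = refA text l s (mq - count) := by
  induction l with
  | nil => intro s count; simp [PySem.List.enumerate_nil, pvA_loop, refA]
  | cons c rest ih =>
    intro s count
    rw [PySem.List.enumerate_cons]
    simp only [pvA_loop, refA]
    by_cases hc : c = '?'
    · rw [if_pos hc, if_pos hc]
      by_cases ht : count + 1 ≥ mq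
      · rw [if_pos ht, if_pos (show mq - count ≤ 1 by omega)]
      · rw [if_neg ht, if_neg (show ¬ mq - count ≤ 1 by omega), ih]
        congr 1; omega
    · rw [if_neg hc, if_neg hc, ih]

lemma refA_clamp (text : String) (l : List Char) :
    ∀ (i : Int) (k k' : Int), k ≤ 1 → k' ≤ 1 → refA text l i k = refA text l i k' := by
  induction l with
  | nil => intros; rfl
  | cons c rest ih =>
    intro i k k' hk hk'
    simp only [refA]
    by_cases hc : c = '?'
    · rw [if_pos hc, if_pos hc, if_pos hk, if_pos hk']
    · rw [if_neg hc, if_neg hc, ih _ _ _ hk hk']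

-- Pure recursive characterization of split('?', m) on the char list.
def mySplit : Nat → List Char → List (List Char)
  | 0, l => [l]
  | _ + 1, [] => [[]]
  | m + 1, c :: rest => if c = '?' then [] :: mySplit m rest else (mySplit (m + 1) rest).modifyHead (c :: ·)

lemma mySplit_nil (m : Nat) : mySplit m [] = [[]] := by cases m <;> rfl

lemma length_mySplit (m : Nat) (l : List Char) :
    (mySplit m l).length = min (l.count '?') m + 1 := by
  induction l generalizing m with
  | nil => rw [mySplit_nil]; simp
  | cons c rest ih =>
    cases m with
    | zero => simp [mySplit]
    | succ m =>
      simp only [mySplit]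
      by_cases hc : c = '?'
      · rw [if_pos hc, List.length_cons, ih m]
        subst hc
        simp
      · rw [if_neg hc, List.length_modifyHead, ih (m + 1), List.count_cons]
        simp [hc]

lemma mySplit_ne_nil (m : Nat) (l : List Char) : mySplit m l ≠ [] := by
  intro h
  have := congrArg List.length h
  rw [length_mySplit] at this
  simp at this

-- The PySem split loop computes mySplit.
lemma go_eq_mySplit : ∀ (fuel : Nat) (l : List Char), l.length < fuel → ∀ (m : Nat) (cur : List Char) (acc : List (List Char)),
    PySem.Chars.splitOnMax.go ['?'] fuel m l cur acc = acc.reverse ++ (mySplit m l).modifyHead (cur.reverse ++ ·) := by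
  intro fuel
  induction fuel with
  | zero => intro l h; omega
  | succ f ih =>
    intro l hl m cur acc
    match l with
    | [] =>
      rw [mySplit_nil]
      simp [PySem.Chars.splitOnMax.go, List.modifyHead]
    | c :: rest =>
      cases m with
      | zero =>
        simp [PySem.Chars.splitOnMax.go, mySplit, List.modifyHead]
      | succ m =>
        by_cases hc : c = '?'
        · have hpre : (['?'].isPrefixOf (c :: rest)) = true := by subst hc; simp [List.isPrefixOf]
          simp only [PySem.Chars.splitOnMax.go, if_neg (Nat.succ_ne_zero m), hpre, if_true,
            List.length_cons, List.length_nil, Nat.add_sub_cancel, List.drop_succ_cons, List.drop_zero,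
            Nat.zero_add]
          rw [ih rest (by simpa using Nat.lt_of_succ_lt_succ hl) m [] (cur.reverse :: acc)]
          simp only [mySplit, if_pos hc]
          cases hM : mySplit m rest with
          | nil => exact absurd hM (mySplit_ne_nil m rest)
          | cons a t => simp [List.modifyHead]
        · have hpre : (['?'].isPrefixOf (c :: rest)) = false := by
            simp [List.isPrefixOf]
            exact fun h => hc h.symm
          simp only [PySem.Chars.splitOnMax.go, if_neg (Nat.succ_ne_zero m), hpre]
          simp only [Bool.false_eq_true, if_false]
          rw [ih rest (by simpa using Nat.lt_of_succ_lt_succ hl) (m + 1) (c :: cur) acc]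
          simp only [mySplit, if_neg hc]
          cases hM : mySplit (m + 1) rest with
          | nil => exact absurd hM (mySplit_ne_nil (m + 1) rest)
          | cons a t => simp [List.modifyHead]

-- A's scan equals the split-based formula.
lemma refA_eq_mySplit (text : String) : ∀ (l : List Char) (k i : Int), 1 ≤ k →
    refA text l i k = if (l.count '?' : Int) < k then text
      else PySem.Str.strip (PySem.Str.slice text none (some (i + l.length - ((mySplit k.toNat l).getLast?.getD []).length))) := by
  intro l
  induction l with
  | nil =>
    intro k i hk
    rw [refA, if_pos (by simp; omega)]
  | cons c rest ih =>
    intro k i hk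
    by_cases hc : c = '?'
    · subst hc
      have hcount : (('?' :: rest).count '?') = rest.count '?' + 1 := by simp
      simp only [refA, if_true]
      by_cases hk1 : k ≤ 1
      · have hk' : k = 1 := le_antisymm hk1 hk
        subst hk'
        have hno : ¬ (((('?' :: rest).count '?' : Int)) < 1) := by rw [hcount]; push_cast; omega
        rw [if_neg hno]
        have : mySplit (1 : Int).toNat ('?' :: rest) = [] :: mySplit 0 rest := by
          simp [mySplit]
        rw [this]
        simp only [mySplit]
        have hlast : (([] :: [rest] : List (List Char)).getLast?.getD []) = rest := by simp
        rw [hlast]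
        exact congrArg (fun z => PySem.Str.strip (PySem.Str.slice text none (some z))) (by push_cast [List.length_cons]; omega)
      · rw [if_neg hk1, ih (k - 1) (i + 1) (by omega)]
        have hcond : ((rest.count '?' : Int) < k - 1) ↔ ((('?' :: rest).count '?' : Int) < k) := by
          rw [hcount]; push_cast; omega
        by_cases hq : (rest.count '?' : Int) < k - 1
        · rw [if_pos hq, if_pos (hcond.mp hq)]
        · rw [if_neg hq, if_neg (fun h => hq (hcond.mpr h))]
          have hms : mySplit k.toNat ('?' :: rest) = [] :: mySplit (k - 1).toNat rest := by
            have h1 : k.toNat = (k - 1).toNat + 1 := by omega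
            rw [h1]; simp [mySplit]
          rw [hms]
          have hlast : (([] :: mySplit (k - 1).toNat rest).getLast?.getD []) =
              ((mySplit (k - 1).toNat rest).getLast?.getD []) := by
            cases hM : mySplit (k - 1).toNat rest with
            | nil => exact absurd hM (mySplit_ne_nil _ rest)
            | cons a t => simp
          rw [hlast]
          exact congrArg (fun z => PySem.Str.strip (PySem.Str.slice text none (some z))) (by push_cast [List.length_cons]; omega)
    · simp only [refA, if_neg hc]
      rw [ih k (i + 1) hk]
      have hcount : ((c :: rest).count '?') = rest.count '?' := by simp [hc]
      rw [hcount]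
      by_cases hq : (rest.count '?' : Int) < k
      · rw [if_pos hq, if_pos hq]
      · rw [if_neg hq, if_neg hq]
        have hms : mySplit k.toNat (c :: rest) = (mySplit k.toNat rest).modifyHead (c :: ·) := by
          have h1 : k.toNat = (k.toNat - 1) + 1 := by omega
          rw [h1]; simp only [mySplit, if_neg hc]
        rw [hms]
        have hlen2 : 2 ≤ (mySplit k.toNat rest).length := by
          rw [length_mySplit]; omega
        have hlast : (((mySplit k.toNat rest).modifyHead (c :: ·)).getLast?.getD []) =
            ((mySplit k.toNat rest).getLast?.getD []) := by
          match hM : mySplit k.toNat rest with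
          | [] => exact absurd hM (mySplit_ne_nil _ rest)
          | [a] => rw [hM] at hlen2; simp at hlen2
          | a :: b :: t => simp [List.modifyHead]
        rw [hlast]
        exact congrArg (fun z => PySem.Str.strip (PySem.Str.slice text none (some z))) (by push_cast [List.length_cons]; omega)

lemma pyGet?_neg_one {α : Type} (l : List α) (h : l ≠ []) :
    PySem.List.pyGet? l (-1) = l.getLast? := by
  have hlen : 1 ≤ l.length := List.length_pos_iff.mpr h
  simp only [PySem.List.pyGet?, PySem.List.pyIdx?]
  rw [if_neg (by omega), if_pos (by omega)]
  simp [List.getLast?_eq_getElem?]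

-- ===== VERDICT (by name: the statement is the Claim_ definition above) =====
theorem enforce_question_limit_py_spec : Claim_equal_enforce_question_limit_py := by
  intro text mq _
  unfold Spec_enforce_question_limit_py enforce_question_limit_py enforce_question_limit_py_alt
  rw [pvA_loop_eq_refA]
  set n : Int := max 1 mq with hn
  have hn1 : 1 ≤ n := le_max_left 1 mq
  have hA : refA text text.toList 0 (mq - 0) = refA text text.toList 0 n := by
    by_cases h : mq ≤ 1
    · exact refA_clamp text _ _ _ _ (by omega) (by omega)
    · congr 1; omega
  rw [hA, refA_eq_mySplit text text.toList n 0 hn1]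
  -- unfold B's split down to mySplit
  have hsplit : (PySem.Str.splitMax? text "?" n).getD [] =
      (mySplit n.toNat text.toList).map String.ofList := by
    have hq : "?".toList = ['?'] := rfl
    simp only [PySem.Str.splitMax?, PySem.Chars.splitMax?, PySem.Chars.splitOnMax, hq]
    rw [if_neg (by simp), if_neg (by omega)]
    rw [go_eq_mySplit (text.toList.length + 1) text.toList (by omega) n.toNat [] []]
    cases hM : mySplit n.toNat text.toList with
    | nil => exact absurd hM (mySplit_ne_nil _ _)
    | cons a t => simp [List.modifyHead]
  simp only [hsplit]
  have hne : (mySplit n.toNat text.toList) ≠ [] := mySplit_ne_nil _ _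
  have hlen : ((mySplit n.toNat text.toList).map String.ofList).length = min (text.toList.count '?') n.toNat + 1 := by
    rw [List.length_map, length_mySplit]
  have hcond : (((mySplit n.toNat text.toList).map String.ofList).length : Int) ≤ n ↔
      (text.toList.count '?' : Int) < n := by
    rw [hlen]; push_cast; omega
  by_cases hq : (text.toList.count '?' : Int) < n
  · rw [if_pos hq, if_pos (hcond.mpr hq)]
  · rw [if_neg hq, if_neg (fun h => hq (hcond.mp h))]
    have hmapne : (mySplit n.toNat text.toList).map String.ofList ≠ [] := by
      simpa using hne
    rw [pyGet?_neg_one _ hmapne, List.getLast?_map]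
    obtain ⟨last, hlast⟩ : ∃ last, (mySplit n.toNat text.toList).getLast? = some last := by
      cases hM : (mySplit n.toNat text.toList).getLast? with
      | none => exact absurd (List.getLast?_eq_none_iff.mp hM) hne
      | some a => exact ⟨a, rfl⟩
    rw [hlast]
    simp only [Option.map_some, Option.getD_some]
    refine congrArg (fun z => PySem.Str.strip (PySem.Str.slice text none (some z))) ?_
    rw [PySem.Str.len_eq, PySem.Str.len_eq]
    have hofl : (String.ofList last).toList = last := by simp
    rw [hofl]
    omega
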